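-- pv_equiv track=rewrite | github.com/joaoviitorsx/apuradorICMS-Flet | src/Utils/validadores.py | formatarValor
-- ===== SOURCE A (Python) =====
-- def formatarValor(value):
--         cleaned = ''.join(c for c in value if c.isdigit() or c == ',')
--         parts = cleaned.split(',')
--         if len(parts) > 2:
--             return parts[0] + ',' + ''.join(parts[1:])
--         if len(parts) == 2 and len(parts[1]) > 2:
--             return parts[0] + ',' + parts[1][:2]
--         return cleaned
-- ===== SOURCE B (Python) =====
-- def formatarValor(value):
--     intpart = []
--     dec = []
--     commas = 0
--     for c in value:
--         if c.isdigit():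
--             (dec if commas else intpart).append(c)
--         elif c == ',':
--             commas += 1
--     if commas == 0:
--         return ''.join(intpart)
--     decs = ''.join(dec)
--     if commas == 1:
--         return ''.join(intpart) + ',' + (decs[:2] if len(decs) > 2 else decs)
--     return ''.join(intpart) + ',' + decs
-- ===== Notes on version B (the rewrite author's own statement) =====
-- stated objective: alternative
-- what changed: Replaces A's clean/split/index pipeline (build cleaned string, split on commas, index and re-join the parts list) by a single left-to-right scan that maintains an integer buffer, a decimal buffer and a comma counter, so no intermediate parts list is ever built.
import Mathlib
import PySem

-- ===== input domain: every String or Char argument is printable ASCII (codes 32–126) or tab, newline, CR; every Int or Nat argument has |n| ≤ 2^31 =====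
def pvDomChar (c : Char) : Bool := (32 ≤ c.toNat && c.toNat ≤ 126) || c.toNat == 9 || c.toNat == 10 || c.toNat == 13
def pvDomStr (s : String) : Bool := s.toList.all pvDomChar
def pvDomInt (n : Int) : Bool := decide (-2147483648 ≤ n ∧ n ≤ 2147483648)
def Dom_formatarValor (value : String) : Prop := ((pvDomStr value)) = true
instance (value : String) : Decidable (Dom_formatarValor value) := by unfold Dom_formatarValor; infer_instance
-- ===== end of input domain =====

-- B replaces A's clean/split/index pipeline by one left-to-right scan keeping an
-- integer buffer, a decimal buffer and a comma counter (objective: alternative).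

-- ===== PORT A =====
def formatarValor (value : String) : String :=
  let cleaned := value.toList.filter (fun c => PySem.Chars.isdigit c || c == ',')
  let parts := PySem.Chars.splitOn cleaned [',']
  if parts.length > 2 then
    String.ofList (PySem.List.pyGetD parts 0 [] ++ [','] ++
      PySem.Chars.join [] (PySem.List.slice parts (some 1) none))
  else if parts.length = 2 && (PySem.List.pyGetD parts 1 []).length > 2 then
    String.ofList (PySem.List.pyGetD parts 0 [] ++ [','] ++
      PySem.List.slice (PySem.List.pyGetD parts 1 []) none (some 2))
  else String.ofList cleaned

-- ===== PORT B =====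
-- one scan: (integer buffer, decimal buffer, comma count)
def altStep (st : List Char × List Char × Nat) (c : Char) : List Char × List Char × Nat :=
  if PySem.Chars.isdigit c then
    if st.2.2 > 0 then (st.1, st.2.1 ++ [c], st.2.2) else (st.1 ++ [c], st.2.1, st.2.2)
  else if c == ',' then (st.1, st.2.1, st.2.2 + 1)
  else st

def formatarValor_alt (value : String) : String :=
  let st := value.toList.foldl altStep (([] : List Char), ([] : List Char), (0 : Nat))
  if st.2.2 = 0 then String.ofList st.1
  else if st.2.2 = 1 then
    String.ofList (st.1 ++ [','] ++ (if st.2.1.length > 2 then st.2.1.take 2 else st.2.1))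
  else String.ofList (st.1 ++ [','] ++ st.2.1)

-- ===== PRECONDITION & SPEC =====
def Spec_formatarValor (value : String) (out : String) : Prop := out = formatarValor_alt value
instance (value : String) (out : String) : Decidable (Spec_formatarValor value out) := by unfold Spec_formatarValor; infer_instance

-- ===== CLAIM (what is proved, stated in full; the proofs are below) =====
def Claim_equal_formatarValor : Prop := ∀ (value : String), Dom_formatarValor value → Spec_formatarValor value (formatarValor value)

-- ===== LEMMAS AND PROOFS =====

-- proof-side vocabulary
def keepP (c : Char) : Bool := PySem.Chars.isdigit c || c == ','

def digs (l : List Char) : List Char := l.filter (fun c => PySem.Chars.isdigit c)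

def ncommas (l : List Char) : Nat := l.countP (fun c => !PySem.Chars.isdigit c && c == ',')

def preDigs : List Char → List Char
  | [] => []
  | c :: t => if PySem.Chars.isdigit c then c :: preDigs t else if c = ',' then [] else preDigs t

def postDigs : List Char → List Char
  | [] => []
  | c :: t => if PySem.Chars.isdigit c then postDigs t else if c = ',' then digs t else postDigs t

-- simple recursive single-char split, used to reason about PySem.Chars.splitOn _ [',']
def splitc : List Char → List (List Char)
  | [] => [[]]
  | c :: t => if c = ',' then [] :: splitc t
              else match splitc t with
                   | p :: ps => (c :: p) :: ps
                   | [] => [[c]]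

lemma splitc_ne_nil (l : List Char) : splitc l ≠ [] := by
  cases l with
  | nil => simp [splitc]
  | cons c t =>
    simp only [splitc]
    split
    · simp
    · cases h : splitc t <;> simp

lemma splitOn_go_eq (fuel : Nat) (l cur : List Char) (acc : List (List Char))
    (h : l.length ≤ fuel) :
    PySem.Chars.splitOn.go [','] fuel l cur acc
      = acc.reverse ++ (splitc l).modifyHead (cur.reverse ++ ·) := by
  induction fuel generalizing l cur acc with
  | zero =>
    have : l = [] := List.eq_nil_of_length_eq_zero (Nat.le_zero.mp h)
    subst this
    simp [PySem.Chars.splitOn.go, splitc]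
  | succ n ih =>
    cases l with
    | nil => simp [PySem.Chars.splitOn.go, splitc]
    | cons c rest =>
      simp only [PySem.Chars.splitOn.go]
      by_cases hc : c = ','
      · subst hc
        have hpre : [','].isPrefixOf (',' :: rest) = true := by
          simp [List.isPrefixOf]
        rw [if_pos hpre]
        have hdrop : List.drop [','].length (',' :: rest) = rest := rfl
        simp only [List.length] at h
        rw [hdrop, ih rest [] (cur.reverse :: acc) (by omega)]
        simp only [splitc, if_pos rfl, List.modifyHead_cons, List.reverse_cons]
        cases splitc rest <;> simp
      · have hpre : [','].isPrefixOf (c :: rest) = false := by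
          simp [List.isPrefixOf, hc]
          intro h'; exact absurd h'.symm hc
        rw [if_neg (by simp [hpre])]
        simp only [List.length] at h
        rw [ih rest (c :: cur) acc (by omega)]
        simp only [splitc, if_neg hc]
        cases hs : splitc rest with
        | nil => exact absurd hs (splitc_ne_nil rest)
        | cons p ps => simp

lemma splitOn_comma (l : List Char) :
    PySem.Chars.splitOn l [','] = splitc l := by
  unfold PySem.Chars.splitOn
  rw [splitOn_go_eq (l.length + 1) l [] [] (by omega)]
  cases h : splitc l with
  | nil => exact absurd h (splitc_ne_nil l)
  | cons p ps => simp

-- comma is not a digit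
lemma isdigit_comma : PySem.Chars.isdigit ',' = false := by decide

-- the fold, once a comma has been seen, just appends every digit to the decimal buffer
lemma fold_pos (l : List Char) (ip dec : List Char) (n : Nat) :
    l.foldl altStep (ip, dec, n + 1) = (ip, dec ++ digs l, (n + 1) + ncommas l) := by
  induction l generalizing dec n with
  | nil => simp [digs, ncommas]
  | cons c t ih =>
    simp only [List.foldl_cons, altStep]
    by_cases hd : PySem.Chars.isdigit c
    · simp [hd, ih (dec ++ [c]) n, digs, ncommas]
    · by_cases hc : c = ','
      · subst hc
        simp only [isdigit_comma, Bool.false_eq_true, if_false, beq_self_eq_true, if_true]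
        rw [ih dec (n + 1)]
        simp [digs, ncommas, isdigit_comma]
        omega
      · simp only [hd, if_false, Bool.false_eq_true]
        rw [if_neg (by simp [hc]), ih dec n]
        simp [digs, ncommas, hd, hc]

-- the fold before any comma builds (preDigs, postDigs, ncommas)
lemma fold_zero (l : List Char) (ip dec : List Char) :
    l.foldl altStep (ip, dec, 0) = (ip ++ preDigs l, dec ++ postDigs l, ncommas l) := by
  induction l generalizing ip with
  | nil => simp [preDigs, postDigs, ncommas]
  | cons c t ih =>
    rw [List.foldl_cons]
    by_cases hd : PySem.Chars.isdigit c
    · have hstep : altStep (ip, dec, 0) c = (ip ++ [c], dec, 0) := by simp [altStep, hd]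
      rw [hstep, ih (ip ++ [c])]
      simp [preDigs, postDigs, ncommas, hd]
    · by_cases hc : c = ','
      · subst hc
        have hstep : altStep (ip, dec, 0) ',' = (ip, dec, 1) := by
          simp [altStep, isdigit_comma]
        rw [hstep, fold_pos t ip dec 0]
        simp [preDigs, postDigs, ncommas, isdigit_comma, digs, Nat.add_comm]
      · have hstep : altStep (ip, dec, 0) c = (ip, dec, 0) := by simp [altStep, hd, hc]
        rw [hstep, ih ip]
        simp [preDigs, postDigs, ncommas, hd, hc]

-- the split of the cleaned string: number of parts
lemma splitc_filter_length (l : List Char) :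
    (splitc (l.filter keepP)).length = ncommas l + 1 := by
  induction l with
  | nil => simp [splitc, ncommas]
  | cons c t ih =>
    by_cases hd : PySem.Chars.isdigit c
    · have hc : ¬ c = ',' := fun h => by subst h; simp [isdigit_comma] at hd
      simp only [List.filter, keepP, hd, Bool.true_or, splitc, if_neg hc]
      cases hs : splitc (t.filter keepP) with
      | nil => exact absurd hs (splitc_ne_nil _)
      | cons p ps =>
        rw [hs] at ih
        simp only [ncommas, List.countP_cons, hd] at ih ⊢
        simp at ih ⊢
        omega
    · by_cases hc : c = ','
      · subst hc
        simp only [List.filter, keepP, isdigit_comma, beq_self_eq_true, Bool.false_or,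
          Bool.or_true, splitc, if_pos rfl]
        simp only [ncommas, List.countP_cons, isdigit_comma] at ih ⊢
        simp at ih ⊢
        omega
      · have : keepP c = false := by simp [keepP, hd, hc]
        simp only [List.filter, this]
        simpa [ncommas, List.countP_cons, hd, hc] using ih

-- head part = preDigs
lemma splitc_filter_head (l : List Char) :
    (splitc (l.filter keepP)).headD [] = preDigs l := by
  induction l with
  | nil => simp [splitc, preDigs]
  | cons c t ih =>
    by_cases hd : PySem.Chars.isdigit c
    · have hc : ¬ c = ',' := fun h => by subst h; simp [isdigit_comma] at hd
      simp only [List.filter, keepP, hd, Bool.true_or, splitc, if_neg hc]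
      cases hs : splitc (t.filter keepP) with
      | nil => exact absurd hs (splitc_ne_nil _)
      | cons p ps =>
        rw [hs] at ih
        simp [preDigs, hd] at ih ⊢
        exact ih
    · by_cases hc : c = ','
      · subst hc
        simp [List.filter, keepP, isdigit_comma, splitc, preDigs]
      · have : keepP c = false := by simp [keepP, hd, hc]
        simp only [List.filter, this]
        simpa [preDigs, hd, hc] using ih

-- the concatenation of ALL parts is all digits
lemma splitc_filter_flatten (l : List Char) :
    (splitc (l.filter keepP)).flatten = digs l := by
  induction l with
  | nil => simp [splitc, digs]
  | cons c t ih =>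
    by_cases hd : PySem.Chars.isdigit c
    · have hc : ¬ c = ',' := fun h => by subst h; simp [isdigit_comma] at hd
      simp only [List.filter, keepP, hd, Bool.true_or, splitc, if_neg hc]
      cases hs : splitc (t.filter keepP) with
      | nil => exact absurd hs (splitc_ne_nil _)
      | cons p ps =>
        rw [hs] at ih
        simp [digs, hd] at ih ⊢
        exact ih
    · by_cases hc : c = ','
      · subst hc
        simpa [List.filter, keepP, isdigit_comma, splitc, digs] using ih
      · have : keepP c = false := by simp [keepP, hd, hc]
        simp only [List.filter, this]
        simpa [digs, hd, hc] using ih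

-- the concatenation of the parts after the first = postDigs
lemma splitc_filter_tail_flatten (l : List Char) :
    ((splitc (l.filter keepP)).drop 1).flatten = postDigs l := by
  induction l with
  | nil => simp [splitc, postDigs]
  | cons c t ih =>
    by_cases hd : PySem.Chars.isdigit c
    · have hc : ¬ c = ',' := fun h => by subst h; simp [isdigit_comma] at hd
      simp only [List.filter, keepP, hd, Bool.true_or, splitc, if_neg hc]
      cases hs : splitc (t.filter keepP) with
      | nil => exact absurd hs (splitc_ne_nil _)
      | cons p ps =>
        rw [hs] at ih
        simp [postDigs, hd] at ih ⊢
        exact ih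
    · by_cases hc : c = ','
      · subst hc
        simp only [List.filter, keepP, isdigit_comma, beq_self_eq_true, Bool.false_or,
          Bool.or_true, splitc, if_pos rfl, List.drop_succ_cons, List.drop_zero, postDigs]
        simpa [isdigit_comma] using splitc_filter_flatten t
      · have : keepP c = false := by simp [keepP, hd, hc]
        simp only [List.filter, this]
        simpa [postDigs, hd, hc] using ih

-- with no comma the cleaned string is exactly the digits, and preDigs/postDigs degenerate
lemma filter_eq_digs_of_no_comma (l : List Char) (h : ncommas l = 0) :
    l.filter keepP = digs l := by
  induction l with
  | nil => simp [digs]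
  | cons c t ih =>
    simp only [ncommas, List.countP_cons] at h
    by_cases hd : PySem.Chars.isdigit c
    · have ht : ncommas t = 0 := by simp [hd] at h; simpa [ncommas] using h
      simp [List.filter, keepP, hd, digs, ih ht]
    · by_cases hc : c = ','
      · subst hc; simp [isdigit_comma] at h
      · have ht : ncommas t = 0 := by simp [hd, hc] at h; simpa [ncommas] using h
        have : keepP c = false := by simp [keepP, hd, hc]
        simp [List.filter, this, digs, hd, ih ht]

lemma preDigs_eq_digs_of_no_comma (l : List Char) (h : ncommas l = 0) :
    preDigs l = digs l := by
  induction l with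
  | nil => simp [preDigs, digs]
  | cons c t ih =>
    simp only [ncommas, List.countP_cons] at h
    by_cases hd : PySem.Chars.isdigit c
    · have ht : ncommas t = 0 := by simp [hd] at h; simpa [ncommas] using h
      simp [preDigs, digs, hd, ih ht]
    · by_cases hc : c = ','
      · subst hc; simp [isdigit_comma] at h
      · have ht : ncommas t = 0 := by simp [hd, hc] at h; simpa [ncommas] using h
        simp [preDigs, digs, hd, hc, ih ht]

-- with exactly one comma the cleaned string is preDigs ++ ',' ++ postDigs
lemma filter_eq_of_one_comma (l : List Char) (h : ncommas l = 1) :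
    l.filter keepP = preDigs l ++ [','] ++ postDigs l := by
  induction l with
  | nil => simp [ncommas] at h
  | cons c t ih =>
    simp only [ncommas, List.countP_cons] at h
    by_cases hd : PySem.Chars.isdigit c
    · have ht : ncommas t = 1 := by simp [hd] at h; simpa [ncommas] using h
      simp [List.filter, keepP, hd, preDigs, postDigs, ih ht]
    · by_cases hc : c = ','
      · subst hc
        have ht : ncommas t = 0 := by simp [isdigit_comma] at h; simpa [ncommas] using h
        simp only [List.filter, keepP, isdigit_comma, beq_self_eq_true, Bool.false_or,
          Bool.or_true, preDigs, postDigs, if_pos rfl]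
        simp [isdigit_comma, filter_eq_digs_of_no_comma t ht]
      · have ht : ncommas t = 1 := by simp [hd, hc] at h; simpa [ncommas] using h
        have hk : keepP c = false := by simp [keepP, hd, hc]
        simp [List.filter, hk, preDigs, postDigs, hd, hc, ih ht]

-- join with empty separator is flatten
lemma join_nil_eq_flatten : ∀ (ps : List (List Char)), PySem.Chars.join [] ps = ps.flatten
  | [] => by simp [PySem.Chars.join, List.intercalate]
  | [p] => by simp [PySem.Chars.join, List.intercalate]
  | p :: q :: r => by
      have := join_nil_eq_flatten (q :: r)
      simp only [PySem.Chars.join, List.intercalate] at this ⊢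
      simp [List.intersperse, this]

-- ===== VERDICT (by name: the statement is the Claim_ definition above) =====
theorem formatarValor_spec : Claim_equal_formatarValor := by
  intro value _
  unfold Spec_formatarValor formatarValor formatarValor_alt
  simp only [show (fun c => PySem.Chars.isdigit c || c == ',') = keepP from rfl]
  set l := value.toList with hl
  rw [fold_zero l [] []]
  simp only [List.nil_append]
  rw [splitOn_comma]
  have hlen := splitc_filter_length l
  have hhead := splitc_filter_head l
  have htail := splitc_filter_tail_flatten l
  by_cases h0 : ncommas l = 0
  · -- one part: A returns the cleaned string, B the integer buffer
    rw [if_pos h0]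
    rw [h0] at hlen
    rw [if_neg (by omega), if_neg (by simp [hlen])]
    rw [filter_eq_digs_of_no_comma l h0, preDigs_eq_digs_of_no_comma l h0]
  · rw [if_neg h0]
    by_cases h1 : ncommas l = 1
    · -- exactly two parts
      rw [if_pos h1]
      rw [h1] at hlen
      obtain ⟨p0, p1, hps⟩ : ∃ p0 p1, splitc (l.filter keepP) = [p0, p1] := by
        match hsp : splitc (l.filter keepP) with
        | [p0, p1] => exact ⟨p0, p1, rfl⟩
        | [] | [_] | _ :: _ :: _ :: _ => rw [hsp] at hlen; simp at hlen
      rw [hps] at hhead htail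
      simp only [List.headD_cons] at hhead
      simp only [List.drop_succ_cons, List.drop_zero, List.flatten_cons,
        List.flatten_nil, List.append_nil] at htail
      rw [hps]
      have hget0 : PySem.List.pyGetD [p0, p1] 0 [] = p0 := by simp [pysem]
      have hget1 : PySem.List.pyGetD [p0, p1] 1 [] = p1 := by simp [pysem]
      rw [if_neg (by simp)]
      by_cases hlong : p1.length > 2
      · have hlong' : (postDigs l).length > 2 := by rw [← htail]; exact hlong
        rw [if_pos (by simp [hget1]; omega), if_pos hlong']
        rw [hget0, hget1, PySem.List.slice_to (xs := p1) (b := 2) (by norm_num)]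
        simp [hhead, htail]
      · have hlong' : ¬ (postDigs l).length > 2 := by rw [← htail]; exact hlong
        rw [if_neg (by simp [hget1]; omega), if_neg hlong']
        rw [filter_eq_of_one_comma l h1]
    · -- three or more parts
      rw [if_neg h1]
      obtain ⟨p0, rest, hps⟩ : ∃ p0 rest, splitc (l.filter keepP) = p0 :: rest := by
        cases hsp : splitc (l.filter keepP) with
        | nil => exact absurd hsp (splitc_ne_nil _)
        | cons a b => exact ⟨a, b, rfl⟩
      rw [hps] at hhead htail hlen
      rw [hps]
      rw [if_pos (by simp at hlen ⊢; omega)]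
      rw [join_nil_eq_flatten]
      have hsl : PySem.List.slice (p0 :: rest) (some 1) none = rest := by
        have := PySem.List.slice_from_natCast (xs := p0 :: rest) (a := 1)
        simpa using this
      rw [hsl]
      simp only [List.drop_succ_cons, List.drop_zero] at htail
      simp only [List.headD_cons] at hhead
      rw [PySem.List.pyGetD_zero_cons, hhead, htail]
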